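-- pv_equiv track=rewrite | github.com/dmater01/LightRAG | generate_code/src/utils/text_processing.py | get_sliding_windows
-- ===== SOURCE A (Python) =====
-- from typing import List, Dict, Any
--
-- def simple_tokenize(text: str) -> List[str]:
--     """
--     Simple whitespace tokenizer.
--
--     Args:
--         text: Input text
--
--     Returns:
--         List of tokens
--     """
--     return text.split()
--
-- def get_sliding_windows(text: str, window_size: int = 50, step: int = 1) -> List[str]:
--     """
--     Generates sliding windows of tokens from text.
--     Used for Windowed PPL defense.
--
--     Args:
--         text: Input text
--         window_size: Number of tokens per window
--         step: Step size for sliding window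
--
--     Returns:
--         List of text segments (windows)
--     """
--     tokens = simple_tokenize(text)
--
--     # If text is shorter than window, return it as is
--     if len(tokens) <= window_size:
--         return [text]
--
--     windows = []
--     # Slide window
--     for i in range(0, len(tokens) - window_size + 1, step):
--         window_tokens = tokens[i : i + window_size]
--         windows.append(" ".join(window_tokens))
--
--     # Ensure we cover the end if step > 1 (though usually step=1 for PPL)
--     # If the loop didn't cover the last segment exactly
--     if step > 1 and (len(tokens) - window_size) % step != 0:
--          window_tokens = tokens[-window_size:]
--          windows.append(" ".join(window_tokens))
--
--     return windows
-- ===== SOURCE B (Python) =====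
-- def get_sliding_windows(text: str, window_size: int = 50, step: int = 1):
--     """Sliding token windows, built once: join all tokens to one normalized
--     string, precompute per-token character offsets, and cut each window out
--     of the joined string instead of re-joining a token slice per window."""
--     tokens = text.split()
--     n = len(tokens)
--     if n <= window_size:
--         return [text]
--     joined = " ".join(tokens)
--     starts = [0]
--     for t in tokens:
--         starts.append(starts[-1] + len(t) + 1)
--
--     def win(i):
--         return joined[starts[i] : starts[i + window_size] - 1]
--
--     windows = [win(i) for i in range(0, n - window_size + 1, step)]
--     if step > 1 and (n - window_size) % step != 0:
--         windows.append(win(n - window_size))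
--     return windows
-- ===== Notes on version B (the rewrite author's own statement) =====
-- stated objective: alternative
-- what changed: Instead of re-joining a token slice for every window, B joins all tokens once into a normalized string, precomputes per-token character offsets (prefix sums), and cuts each window out of the joined string by offset slicing (same for the step>1 tail window).
-- outside the precondition, e.g. on get_sliding_windows('a b c', -1, 1): A returns ['a b', '', '', '', ''], B raises IndexError; on get_sliding_windows('a b c', 0, 1): A returns ['', '', '', ''], B returns ['a b ', '', '', '']
import Mathlib
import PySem

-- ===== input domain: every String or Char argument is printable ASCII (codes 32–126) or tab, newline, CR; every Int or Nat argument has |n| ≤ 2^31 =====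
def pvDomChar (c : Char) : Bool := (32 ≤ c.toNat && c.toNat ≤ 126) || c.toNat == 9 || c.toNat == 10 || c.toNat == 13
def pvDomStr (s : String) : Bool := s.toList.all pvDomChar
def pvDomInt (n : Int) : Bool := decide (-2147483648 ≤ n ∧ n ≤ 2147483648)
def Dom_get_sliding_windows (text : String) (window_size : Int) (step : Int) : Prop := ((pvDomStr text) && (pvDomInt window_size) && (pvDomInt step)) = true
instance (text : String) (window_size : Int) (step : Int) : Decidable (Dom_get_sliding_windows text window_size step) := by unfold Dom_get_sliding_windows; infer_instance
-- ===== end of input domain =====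

-- B re-implements the window construction: one join + per-token character offsets + string slicing,
-- instead of joining a fresh token slice per window (objective: alternative, not faster).

-- ===== PORT A =====
def get_sliding_windows (text : String) (window_size : Int) (step : Int) : List String :=
  let tokens := PySem.Str.split₀ text
  if PySem.List.len tokens ≤ window_size then [text]
  else
    let windows := (PySem.List.pyRange 0 (PySem.List.len tokens - window_size + 1) step).foldl
      (fun acc i => acc ++ [PySem.Str.join " " (PySem.List.slice tokens (some i) (some (i + window_size)))]) []
    if 1 < step ∧ PySem.Int.mod (PySem.List.len tokens - window_size) step ≠ 0 then
      windows ++ [PySem.Str.join " " (PySem.List.slice tokens (some (-window_size)) none)]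
    else windows

-- ===== PORT B =====
def get_sliding_windows_alt (text : String) (window_size : Int) (step : Int) : List String :=
  let tokens := PySem.Str.split₀ text
  let n := PySem.List.len tokens
  if n ≤ window_size then [text]
  else
    let joined := PySem.Str.join " " tokens
    let starts := tokens.foldl
      (fun acc t => acc ++ [PySem.List.pyGetD acc (-1) 0 + PySem.Str.len t + 1]) [(0 : Int)]
    let win := fun (i : Int) =>
      PySem.Str.slice joined (some (PySem.List.pyGetD starts i 0))
        (some (PySem.List.pyGetD starts (i + window_size) 0 - 1))
    let windows := (PySem.List.pyRange 0 (n - window_size + 1) step).map win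
    if 1 < step ∧ PySem.Int.mod (n - window_size) step ≠ 0 then
      windows ++ [win (n - window_size)]
    else windows

-- ===== PRECONDITION & SPEC =====
-- Pre_ excludes step == 0 when the window loop is reached (A raises ValueError in range), and
-- non-positive window_size with positive step: there A's all-empty windows and its `tokens[-0:]`
-- tail are accidents of zero/negative slice arithmetic, and B's offset indexing raises IndexError
-- (for window_size < 0) or disagrees on those degenerate empty windows (window_size == 0).
def Pre_get_sliding_windows (text : String) (window_size : Int) (step : Int) : Prop :=
  PySem.List.len (PySem.Str.split₀ text) ≤ window_size ∨
    (step ≠ 0 ∧ (1 ≤ window_size ∨ step < 0))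
instance (text : String) (window_size : Int) (step : Int) : Decidable (Pre_get_sliding_windows text window_size step) := by unfold Pre_get_sliding_windows; infer_instance

def pvWitness_get_sliding_windows : String × Int × Int := ("a b c d", 2, 1)

def Spec_get_sliding_windows (text : String) (window_size : Int) (step : Int) (out : List String) : Prop := out = get_sliding_windows_alt text window_size step
instance (text : String) (window_size : Int) (step : Int) (out : List String) : Decidable (Spec_get_sliding_windows text window_size step out) := by unfold Spec_get_sliding_windows; infer_instance

-- ===== CLAIM (what is proved, stated in full; the proofs are below) =====
def Claim_equal_get_sliding_windows : Prop := ∀ (text : String) (window_size : Int) (step : Int), Dom_get_sliding_windows text window_size step → Pre_get_sliding_windows text window_size step → Spec_get_sliding_windows text window_size step (get_sliding_windows text window_size step)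

-- ===== LEMMAS AND PROOFS =====

def pvOff (cs : List (List Char)) (k : Nat) : Nat :=
  match cs, k with
  | _, 0 => 0
  | [], _ + 1 => 0
  | t :: rest, k + 1 => t.length + 1 + pvOff rest k

theorem pvOff_nil (k : Nat) : pvOff [] k = 0 := by cases k <;> rfl

theorem pvOff_pos (cs : List (List Char)) (k : Nat) (h1 : 1 ≤ k) (h2 : k ≤ cs.length) :
    1 ≤ pvOff cs k := by
  cases cs with
  | nil => simp at h2; omega
  | cons t rest => cases k with
    | zero => omega
    | succ k => simp [pvOff]; omega

theorem pvOff_shift (cs : List (List Char)) (i w : Nat) :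
    pvOff cs (i + w) = pvOff cs i + pvOff (cs.drop i) w := by
  induction cs generalizing i with
  | nil => simp [pvOff_nil]
  | cons t rest ih =>
    cases i with
    | zero => simp [pvOff]
    | succ k =>
      have h : k + 1 + w = (k + w) + 1 := by omega
      rw [h]
      simp only [pvOff, List.drop_succ_cons, ih k]
      omega

theorem pvJoin_drop (cs : List (List Char)) (i : Nat) :
    (PySem.Chars.join [' '] cs).drop (pvOff cs i) = PySem.Chars.join [' '] (cs.drop i) := by
  induction cs generalizing i with
  | nil => simp [PySem.Chars.join_nil, pvOff_nil]
  | cons t rest ih =>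
    cases i with
    | zero => simp [pvOff]
    | succ k =>
      cases rest with
      | nil =>
        simp only [pvOff, pvOff_nil, PySem.Chars.join_singleton, List.drop_succ_cons,
          List.drop_nil, PySem.Chars.join_nil]
        rw [List.drop_eq_nil_iff.mpr (by omega)]
      | cons u vs =>
        rw [PySem.Chars.join_cons_cons]
        simp only [pvOff, List.drop_succ_cons]
        rw [List.drop_append, List.drop_append]
        have h1 : t.length + 1 + pvOff (u :: vs) k - (t ++ [' ']).length = pvOff (u :: vs) k := by
          simp only [List.length_append, List.length_cons, List.length_nil]; omega
        rw [h1, List.drop_eq_nil_iff.mpr (show t.length ≤ t.length + 1 + pvOff (u :: vs) k by omega),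
           List.drop_eq_nil_iff.mpr (show ([' '] : List Char).length ≤ t.length + 1 + pvOff (u :: vs) k - t.length by simp; omega)]
        simpa using ih k

theorem pvJoin_take (cs : List (List Char)) (k : Nat) (h1 : 1 ≤ k) (h2 : k ≤ cs.length) :
    (PySem.Chars.join [' '] cs).take (pvOff cs k - 1) = PySem.Chars.join [' '] (cs.take k) := by
  induction cs generalizing k with
  | nil => simp at h2; omega
  | cons t rest ih =>
    cases k with
    | zero => omega
    | succ k =>
      cases k with
      | zero =>
        have hoff : pvOff (t :: rest) 1 - 1 = t.length := by
          simp [pvOff]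
        rw [hoff]
        cases rest with
        | nil => simp [PySem.Chars.join_singleton]
        | cons u vs =>
          rw [PySem.Chars.join_cons_cons]
          simp [PySem.Chars.join_singleton]
      | succ k =>
        have hrest : rest.length ≠ 0 := by simp at h2; omega
        cases rest with
        | nil => simp at hrest
        | cons u vs =>
          have hp : 1 ≤ pvOff (u :: vs) (k + 1) := pvOff_pos _ _ (by omega) (by simp at h2 ⊢; omega)
          rw [PySem.Chars.join_cons_cons]
          have hoff : pvOff (t :: u :: vs) (k + 1 + 1) - 1
              = (t ++ [' ']).length + (pvOff (u :: vs) (k + 1) - 1) := by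
            simp only [pvOff, List.length_append, List.length_cons, List.length_nil]; omega
          rw [hoff, List.take_append]
          rw [List.take_of_length_le (Nat.le_add_right _ _), Nat.add_sub_cancel_left]
          rw [ih (k + 1) (by omega) (by simp at h2 ⊢; omega)]
          have htk : (u :: vs).take (k + 1) ≠ [] := by simp
          obtain ⟨w, ws, hw⟩ := List.exists_cons_of_ne_nil htk
          have : (t :: u :: vs).take (k + 1 + 1) = t :: (u :: vs).take (k + 1) := rfl
          rw [this, hw, PySem.Chars.join_cons_cons]

theorem pvWindow (cs : List (List Char)) (i w : Nat) (h1 : 1 ≤ w) (h2 : i + w ≤ cs.length) :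
    ((PySem.Chars.join [' '] cs).drop (pvOff cs i)).take (pvOff cs (i + w) - 1 - pvOff cs i)
      = PySem.Chars.join [' '] ((cs.drop i).take w) := by
  rw [pvJoin_drop]
  have hw : w ≤ (cs.drop i).length := by simp; omega
  have hshift := pvOff_shift cs i w
  have hp : 1 ≤ pvOff (cs.drop i) w := pvOff_pos _ _ h1 hw
  have harith : pvOff cs (i + w) - 1 - pvOff cs i = pvOff (cs.drop i) w - 1 := by omega
  rw [harith, pvJoin_take _ w h1 hw]

def pvBuild (c : Int) (ts : List String) : List Int :=
  match ts with
  | [] => []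
  | t :: rest => (c + PySem.Str.len t + 1) :: pvBuild (c + PySem.Str.len t + 1) rest

theorem pvStarts_foldl (ts : List String) (as : List Int) (c : Int) :
    ts.foldl (fun acc t => acc ++ [PySem.List.pyGetD acc (-1) 0 + PySem.Str.len t + 1]) (as ++ [c])
      = (as ++ [c]) ++ pvBuild c ts := by
  induction ts generalizing as c with
  | nil => simp [pvBuild]
  | cons t rest ih =>
    simp only [List.foldl_cons, pvBuild]
    have hget : PySem.List.pyGetD (as ++ [c]) (-1) 0 = c := by
      rw [PySem.List.pyGetD_neg_ofNat (as ++ [c]) 1 0 (by omega) (by simp)]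
      simp
    rw [hget, List.append_assoc as [c] _]
    have := ih (as ++ [c]) (c + PySem.Str.len t + 1)
    simp only [List.append_assoc] at this ⊢
    exact this

theorem pvBuild_getD (ts : List String) (c : Int) (k : Nat) (h : k ≤ ts.length) :
    (c :: pvBuild c ts).getD k 0 = c + pvOff (ts.map String.toList) k := by
  induction ts generalizing c k with
  | nil =>
    have : k = 0 := by simpa using h
    simp [this, pvOff]
  | cons t rest ih =>
    cases k with
    | zero => simp [pvOff]
    | succ k =>
      simp only [List.getD_cons_succ, pvBuild, List.map_cons, pvOff]
      rw [ih (c + PySem.Str.len t + 1) k (by simpa using h)]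
      simp [PySem.Str.len_eq]
      ring

theorem pvWinStr (tokens : List String) (ws i : Int) (hws : 1 ≤ ws) (h0 : 0 ≤ i)
    (h2 : i + ws ≤ (tokens.length : Int)) :
    PySem.Str.join " " (PySem.List.slice tokens (some i) (some (i + ws))) =
    PySem.Str.slice (PySem.Str.join " " tokens)
      (some (PySem.List.pyGetD ((0:Int) :: pvBuild 0 tokens) i 0))
      (some (PySem.List.pyGetD ((0:Int) :: pvBuild 0 tokens) (i + ws) 0 - 1)) := by
  have hiN : i.toNat ≤ tokens.length := by omega
  have hiwN : (i + ws).toNat ≤ tokens.length := by omega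
  rw [PySem.List.pyGetD_of_nonneg _ _ h0, PySem.List.pyGetD_of_nonneg _ _ (by omega)]
  rw [pvBuild_getD tokens 0 i.toNat hiN, pvBuild_getD tokens 0 (i + ws).toNat hiwN]
  simp only [zero_add]
  set cs := tokens.map String.toList with hcs
  have hcslen : cs.length = tokens.length := by simp [hcs]
  have hsplit : (i + ws).toNat = i.toNat + ws.toNat := by omega
  have hp : 1 ≤ pvOff cs ((i + ws).toNat) := pvOff_pos cs _ (by omega) (by omega)
  rw [PySem.List.slice_toNat tokens h0 (by omega)]
  simp only [PySem.Str.join, PySem.Str.slice, PySem.Chars.slice, String.toList_ofList]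
  have hsep : (" ").toList = [' '] := rfl
  rw [hsep]
  rw [PySem.List.slice_toNat _ (by positivity) (by omega)]
  have ht1 : ((pvOff cs i.toNat : Int)).toNat = pvOff cs i.toNat := by omega
  have ht2 : ((pvOff cs ((i + ws).toNat) : Int) - 1).toNat = pvOff cs ((i + ws).toNat) - 1 := by omega
  rw [ht1, ht2]
  congr 1
  rw [List.map_take, List.map_drop, ← hcs]
  have harith : (pvOff cs ((i + ws).toNat) - 1) - pvOff cs i.toNat
      = pvOff cs (i.toNat + ws.toNat) - 1 - pvOff cs i.toNat := by rw [hsplit]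
  rw [harith, hsplit]
  have := pvWindow cs i.toNat ws.toNat (by omega) (by omega)
  rw [this]
  congr 2
  omega

-- ===== VERDICT (by name: the statement is the Claim_ definition above) =====
theorem get_sliding_windows_spec : Claim_equal_get_sliding_windows := by
  intro text window_size step _ hpre
  unfold Spec_get_sliding_windows
  unfold Pre_get_sliding_windows at hpre
  unfold get_sliding_windows get_sliding_windows_alt
  set tokens := PySem.Str.split₀ text with htok
  by_cases hle : PySem.List.len tokens ≤ window_size
  · simp only [if_pos hle]
  · simp only [if_neg hle]
    rw [PySem.List.len_eq] at hle
    rcases hpre with h | ⟨hs0, hws⟩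
    · rw [PySem.List.len_eq] at h; omega
    rcases lt_trichotomy step 0 with hneg | hz | hpos
    · -- step < 0: the range is empty and the tail guard is false on both sides
      have hr : PySem.List.pyRange 0 (PySem.List.len tokens - window_size + 1) step = [] := by
        have c1 : ¬ step = 0 := hs0
        have c2 : ¬ 0 < step := by omega
        have c3 : ¬ PySem.List.len tokens - window_size + 1 < 0 := by
          rw [PySem.List.len_eq]; omega
        simp [PySem.List.pyRange, c1, c2]
        intro h
        exact absurd h c3
      rw [hr]
      have hc : ¬ (1 < step ∧ PySem.Int.mod (PySem.List.len tokens - window_size) step ≠ 0) := by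
        rintro ⟨h1, -⟩; omega
      rw [if_neg hc, if_neg hc]
      simp
    · exact absurd hz hs0
    · -- step > 0, hence 1 ≤ window_size
      have hws1 : 1 ≤ window_size := by rcases hws with h | h; exact h; omega
      have hst : tokens.foldl
          (fun acc t => acc ++ [PySem.List.pyGetD acc (-1) 0 + PySem.Str.len t + 1]) [(0 : Int)]
          = (0 : Int) :: pvBuild 0 tokens := by
        simpa using pvStarts_foldl tokens [] 0
      rw [hst]
      rw [PySem.List.foldl_append_singleton_eq_map]
      rw [List.nil_append]
      have hmap : ∀ i ∈ PySem.List.pyRange 0 (PySem.List.len tokens - window_size + 1) step,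
          PySem.Str.join " " (PySem.List.slice tokens (some i) (some (i + window_size)))
            = PySem.Str.slice (PySem.Str.join " " tokens)
                (some (PySem.List.pyGetD ((0:Int) :: pvBuild 0 tokens) i 0))
                (some (PySem.List.pyGetD ((0:Int) :: pvBuild 0 tokens) (i + window_size) 0 - 1)) := by
        intro i hi
        rw [PySem.List.len_eq] at hi
        obtain ⟨hi0, hilt, -⟩ := (PySem.List.mem_pyRange_iff_of_pos hpos i).mp hi
        exact pvWinStr tokens window_size i hws1 hi0 (by omega)
      rw [List.map_congr_left hmap]
      by_cases hc : 1 < step ∧ PySem.Int.mod (PySem.List.len tokens - window_size) step ≠ 0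
      · rw [if_pos hc, if_pos hc]
        congr 1
        have htail := pvWinStr tokens window_size (PySem.List.len tokens - window_size) hws1
          (by rw [PySem.List.len_eq]; omega) (by rw [PySem.List.len_eq]; omega)
        rw [← htail]
        congr 1
        rw [PySem.List.slice_some_none]
        have hwN : window_size = ((window_size.toNat : Nat) : Int) := by omega
        rw [hwN, PySem.List.clampIdx_neg_natCast tokens.length window_size.toNat (by omega), ← hwN]
        rw [PySem.List.slice_toNat tokens (by rw [PySem.List.len_eq]; omega)
          (by rw [PySem.List.len_eq]; omega)]
        have h2 : (PySem.List.len tokens - window_size).toNat = tokens.length - window_size.toNat := by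
          rw [PySem.List.len_eq]; omega
        rw [h2]
        have h3 : (PySem.List.len tokens - window_size + window_size).toNat
            - (tokens.length - window_size.toNat) = window_size.toNat := by
          rw [PySem.List.len_eq]; omega
        rw [h3]
        rw [List.take_of_length_le (by simp; omega)]
      · rw [if_neg hc, if_neg hc]
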